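-- pv_equiv track=rewrite | github.com/coldbeeen/cote_study | programmers/비밀 코드 해독(복기)_chanbeen.py | solution
-- ===== SOURCE A (Python) =====
-- def solution(n, q, ans):
--     cases = []
--
--     for i in range(1, n - 4 + 1):
--         for j in range(i + 1, n - 3 + 1):
--             for k in range(j + 1, n - 2 + 1):
--                 for a in range(k + 1, n - 1 + 1):
--                     for b in range(a + 1, n + 1):
--                         cases.append([i, j, k, a, b]) #각 경우의 수
--
--     result = []
--
--     for case in cases: #각 케이스에 대해서
--         result_cnt = 0
--
--         for i in range(len(q)): #각 q에 대해 검증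
--             cnt = 0
--
--             for j in range(5):
--                 if case[j] in q[i]: #등장 순서는 다를 수 있기에 in 문법 사용
--                     cnt += 1
--
--             if cnt == ans[i]: #q 하나에 대해서 검증 완료
--                 result_cnt += 1
--
--         if result_cnt == len(q): #모든 q의 ans와 같다면 가능한 정수 조합으로 검증
--             result.append(case)
--
--     return len(result)
-- ===== SOURCE B (Python) =====
-- def solution(n, q, ans):
--     qsets = [set(qi) for qi in q]
--     checks = list(zip(qsets, ans))
--
--     def count(k, start, chosen):
--         if k == 0:
--             return 1 if all(sum(x in s for x in chosen) == a for s, a in checks) else 0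
--         if n - start + 1 < k:
--             return 0
--         return sum(count(k - 1, x + 1, chosen + (x,)) for x in range(start, n + 1))
--
--     return count(5, 1, ())
-- ===== Notes on version B (the rewrite author's own statement) =====
-- stated objective: alternative
-- what changed: Replaces the five hard-coded nested loops that materialize every 5-combination, then a second indexed pass filtering them, by a single recursive combination counter over (picks-left, start) that prunes branches with too few remaining numbers, checks queries via precomputed sets zipped with ans, and never builds the list of cases.
import Mathlib
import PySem

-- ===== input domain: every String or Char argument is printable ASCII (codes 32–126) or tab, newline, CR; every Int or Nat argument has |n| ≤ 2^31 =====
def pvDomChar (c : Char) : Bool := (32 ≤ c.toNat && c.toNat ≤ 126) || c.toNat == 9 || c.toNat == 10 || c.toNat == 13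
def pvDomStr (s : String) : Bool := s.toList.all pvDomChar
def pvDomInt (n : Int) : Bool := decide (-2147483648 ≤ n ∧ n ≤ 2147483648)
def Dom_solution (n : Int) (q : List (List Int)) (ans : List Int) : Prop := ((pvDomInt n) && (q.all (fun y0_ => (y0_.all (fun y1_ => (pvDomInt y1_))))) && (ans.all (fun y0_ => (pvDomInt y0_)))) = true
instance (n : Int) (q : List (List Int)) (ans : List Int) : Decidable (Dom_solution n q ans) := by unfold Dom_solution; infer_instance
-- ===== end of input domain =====

-- B replaces A's five nested loops plus a second filtering pass by one recursive pruned
-- combination counter over (picks-left, start) that never materializes the case list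
-- (objective: alternative).

-- ===== PORT A =====
def solution (n : Int) (q : List (List Int)) (ans : List Int) : Int :=
  let cases : List (List Int) :=
    (PySem.List.pyRange 1 (n - 4 + 1) 1).foldl (fun cs i =>
      (PySem.List.pyRange (i + 1) (n - 3 + 1) 1).foldl (fun cs j =>
        (PySem.List.pyRange (j + 1) (n - 2 + 1) 1).foldl (fun cs k =>
          (PySem.List.pyRange (k + 1) (n - 1 + 1) 1).foldl (fun cs a =>
            (PySem.List.pyRange (a + 1) (n + 1) 1).foldl (fun cs b =>
              cs ++ [[i, j, k, a, b]]) cs) cs) cs) cs) []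
  let result : List (List Int) :=
    cases.foldl (fun res case_ =>
      let result_cnt : Int :=
        (PySem.List.pyRange 0 (q.length : Int) 1).foldl (fun rc i =>
          let cnt : Int :=
            (PySem.List.pyRange 0 5 1).foldl (fun c j =>
              if (PySem.List.pyGetD q i []).contains (PySem.List.pyGetD case_ j 0)
              then c + 1 else c) 0
          if cnt == PySem.List.pyGetD ans i 0 then rc + 1 else rc) 0
      if result_cnt == (q.length : Int) then res ++ [case_] else res) []
  (result.length : Int)

-- ===== PORT B =====
def altCheck (checks : List (PySem.Set Int × Int)) (chosen : List Int) : Bool :=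
  checks.all (fun sa =>
    (chosen.foldl (fun acc x => acc + (if PySem.Set.contains sa.1 x then 1 else 0)) (0 : Int)) == sa.2)

def altCount (n : Int) (checks : List (PySem.Set Int × Int)) : Nat → Int → List Int → Int
  | 0, _, chosen => if altCheck checks chosen then 1 else 0
  | k + 1, start, chosen =>
    if n - start + 1 < ((k : Int) + 1) then 0
    else ((PySem.List.pyRange start (n + 1) 1).map
            (fun x => altCount n checks k (x + 1) (chosen ++ [x]))).sum

def solution_alt (n : Int) (q : List (List Int)) (ans : List Int) : Int :=
  let qsets := q.map (fun qi => PySem.Set.ofList qi)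
  let checks := qsets.zip ans
  altCount n checks 5 1 []

-- ===== PRECONDITION & SPEC =====
-- Pre_ excludes exactly the inputs where A raises IndexError: n ≥ 5 (so the case list
-- is nonempty) together with len(ans) < len(q), where A reads ans[i] past its end.
def Pre_solution (n : Int) (q : List (List Int)) (ans : List Int) : Prop :=
  q.length ≤ ans.length ∨ n < 5
instance (n : Int) (q : List (List Int)) (ans : List Int) : Decidable (Pre_solution n q ans) := by
  unfold Pre_solution; infer_instance

def pvWitness_solution : Int × List (List Int) × List Int := (6, [[1, 2], [3]], [1, 0])

def Spec_solution (n : Int) (q : List (List Int)) (ans : List Int) (out : Int) : Prop := out = solution_alt n q ans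
instance (n : Int) (q : List (List Int)) (ans : List Int) (out : Int) : Decidable (Spec_solution n q ans out) := by unfold Spec_solution; infer_instance

-- ===== CLAIM (what is proved, stated in full; the proofs are below) =====
def Claim_equal_solution : Prop := ∀ (n : Int) (q : List (List Int)) (ans : List Int), Dom_solution n q ans → Pre_solution n q ans → Spec_solution n q ans (solution n q ans)


-- ===== LEMMAS AND PROOFS =====

-- the lexicographic k-combinations of [start..n], the shape shared by both programs
def comb (n : Int) : Nat → Int → List (List Int)
  | 0, _ => [[]]
  | k + 1, start =>
    (PySem.List.pyRange start (n + 1) 1).flatMap (fun x => (comb n k (x + 1)).map (fun c => x :: c))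

theorem comb_nil (n : Int) : ∀ (k : Nat) (start : Int), n + 1 - start < (k : Int) + 1 →
    comb n (k + 1) start = [] := by
  intro k
  induction k with
  | zero =>
    intro start h
    simp [comb, PySem.List.pyRange_one_eq_nil (by omega : n + 1 ≤ start)]
  | succ k ih =>
    intro start h
    unfold comb
    rw [List.flatMap_eq_nil_iff]
    intro x hx
    rw [PySem.List.mem_pyRange_one] at hx
    rw [ih (x + 1) (by push_cast at h ⊢; omega)]
    simp

theorem comb_length (n : Int) : ∀ (k : Nat) (start : Int) (c : List Int), c ∈ comb n k start →
    c.length = k := by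
  intro k
  induction k with
  | zero => intro start c hc; simp [comb] at hc; simp [hc]
  | succ k ih =>
    intro start c hc
    simp only [comb, List.mem_flatMap, List.mem_map] at hc
    obtain ⟨x, -, c', hc', rfl⟩ := hc
    simp [ih _ _ hc']

-- trimming the upper bound of a flatMap over a range whose tail contributes nothing
theorem flatMap_trim {α : Type} (lo hi m : Int) (f : Int → List α)
    (hm : m ≤ hi) (h : ∀ x, m ≤ x → f x = []) :
    (PySem.List.pyRange lo hi 1).flatMap f = (PySem.List.pyRange lo m 1).flatMap f := by
  by_cases hlm : lo ≤ m
  · rw [PySem.List.pyRange_one_append lo m hi hlm hm, List.flatMap_append]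
    have h2 : (PySem.List.pyRange m hi 1).flatMap f = [] := by
      rw [List.flatMap_eq_nil_iff]
      intro x hx
      rw [PySem.List.mem_pyRange_one] at hx
      exact h x hx.1
    rw [h2, List.append_nil]
  · rw [PySem.List.pyRange_one_eq_nil (by omega : m ≤ lo)]
    simp only [List.flatMap_nil]
    rw [List.flatMap_eq_nil_iff]
    intro x hx
    rw [PySem.List.mem_pyRange_one] at hx
    exact h x (by omega)

theorem flatMap_sing (l : List Int) : l.flatMap (fun x => [[x]]) = l.map (fun b => [b]) := by
  induction l with
  | nil => rfl
  | cons a l ih => simp [ih]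

theorem comb_one (n start : Int) :
    comb n 1 start = (PySem.List.pyRange start (n + 1) 1).map (fun b => [b]) := by
  simp [comb, flatMap_sing]

theorem comb5 (n start : Int) : comb n 5 start =
    (PySem.List.pyRange start (n - 4 + 1) 1).flatMap (fun x => (comb n 4 (x + 1)).map (fun c => x :: c)) := by
  rw [show comb n 5 start = (PySem.List.pyRange start (n + 1) 1).flatMap
      (fun x => (comb n 4 (x + 1)).map (fun c => x :: c)) from rfl]
  refine flatMap_trim start (n + 1) (n - 4 + 1) _ (by omega) (fun x hx => ?_)
  have h4 : comb n 4 (x + 1) = [] := comb_nil n 3 (x + 1) (by push_cast; omega)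
  rw [h4]; simp

theorem comb4 (n start : Int) : comb n 4 start =
    (PySem.List.pyRange start (n - 3 + 1) 1).flatMap (fun x => (comb n 3 (x + 1)).map (fun c => x :: c)) := by
  rw [show comb n 4 start = (PySem.List.pyRange start (n + 1) 1).flatMap
      (fun x => (comb n 3 (x + 1)).map (fun c => x :: c)) from rfl]
  refine flatMap_trim start (n + 1) (n - 3 + 1) _ (by omega) (fun x hx => ?_)
  have h3 : comb n 3 (x + 1) = [] := comb_nil n 2 (x + 1) (by push_cast; omega)
  rw [h3]; simp

theorem comb3 (n start : Int) : comb n 3 start =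
    (PySem.List.pyRange start (n - 2 + 1) 1).flatMap (fun x => (comb n 2 (x + 1)).map (fun c => x :: c)) := by
  rw [show comb n 3 start = (PySem.List.pyRange start (n + 1) 1).flatMap
      (fun x => (comb n 2 (x + 1)).map (fun c => x :: c)) from rfl]
  refine flatMap_trim start (n + 1) (n - 2 + 1) _ (by omega) (fun x hx => ?_)
  have h2 : comb n 2 (x + 1) = [] := comb_nil n 1 (x + 1) (by push_cast; omega)
  rw [h2]; simp

theorem comb2 (n start : Int) : comb n 2 start =
    (PySem.List.pyRange start (n - 1 + 1) 1).flatMap (fun x => (comb n 1 (x + 1)).map (fun c => x :: c)) := by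
  rw [show comb n 2 start = (PySem.List.pyRange start (n + 1) 1).flatMap
      (fun x => (comb n 1 (x + 1)).map (fun c => x :: c)) from rfl]
  refine flatMap_trim start (n + 1) (n - 1 + 1) _ (by omega) (fun x hx => ?_)
  have h1 : comb n 1 (x + 1) = [] := comb_nil n 0 (x + 1) (by push_cast; omega)
  rw [h1]; simp

-- A's nested loops build exactly comb n 5 1
theorem casesA_eq (n : Int) :
    (PySem.List.pyRange 1 (n - 4 + 1) 1).foldl (fun cs i =>
      (PySem.List.pyRange (i + 1) (n - 3 + 1) 1).foldl (fun cs j =>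
        (PySem.List.pyRange (j + 1) (n - 2 + 1) 1).foldl (fun cs k =>
          (PySem.List.pyRange (k + 1) (n - 1 + 1) 1).foldl (fun cs a =>
            (PySem.List.pyRange (a + 1) (n + 1) 1).foldl (fun cs b =>
              cs ++ [[i, j, k, a, b]]) cs) cs) cs) cs) ([] : List (List Int))
    = comb n 5 1 := by
  simp only [PySem.List.foldl_append_singleton_eq_map, PySem.List.foldl_append_eq_flatMap,
    List.nil_append]
  rw [comb5]
  refine List.flatMap_congr (fun i hi => ?_)
  rw [comb4, List.map_flatMap]
  refine List.flatMap_congr (fun j hj => ?_)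
  rw [List.map_map, comb3, List.map_flatMap]
  refine List.flatMap_congr (fun k hk => ?_)
  rw [List.map_map, comb2, List.map_flatMap]
  refine List.flatMap_congr (fun a ha => ?_)
  rw [List.map_map, comb_one, List.map_map]
  refine List.map_congr_left (fun b hb => ?_)
  rfl

-- B's recursion counts the checked combinations
theorem altCount_eq (n : Int) (checks : List (PySem.Set Int × Int)) :
    ∀ (k : Nat) (start : Int) (chosen : List Int),
    altCount n checks k start chosen =
      ((comb n k start).map (fun c => if altCheck checks (chosen ++ c) then (1 : Int) else 0)).sum := by
  intro k
  induction k with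
  | zero => intro start chosen; simp [altCount, comb]
  | succ k ih =>
    intro start chosen
    by_cases hif : n - start + 1 < ((k : Int) + 1)
    · rw [show altCount n checks (k+1) start chosen = 0 by simp [altCount, hif]]
      rw [comb_nil n k start (by omega)]
      simp
    · rw [show altCount n checks (k+1) start chosen
          = ((PySem.List.pyRange start (n + 1) 1).map
              (fun x => altCount n checks k (x + 1) (chosen ++ [x]))).sum by simp [altCount, hif]]
      rw [show comb n (k+1) start
          = (PySem.List.pyRange start (n + 1) 1).flatMap
              (fun x => (comb n k (x + 1)).map (fun c => x :: c)) from rfl]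
      rw [List.map_flatMap, List.flatMap_def, List.sum_flatten, List.map_map]
      congr 1
      apply List.map_congr_left
      intro x hx
      rw [ih (x + 1) (chosen ++ [x])]
      simp only [Function.comp_apply, List.map_map]
      congr 1
      apply List.map_congr_left
      intro c hc
      simp [Function.comp, List.append_assoc]

-- index-loop count of matching queries equals a countP over the zipped lists
theorem countMatch (f : List Int → Int) (q : List (List Int)) (ans : List Int)
    (h : q.length ≤ ans.length) :
    (PySem.List.pyRange 0 (q.length : Int) 1).foldl (fun rc i =>
        if f (PySem.List.pyGetD q i []) == PySem.List.pyGetD ans i 0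
        then rc + 1 else rc) (0 : Int)
      = ((q.zip ans).countP (fun p => f p.1 == p.2) : Int) := by
  have hlen : (q.zip ans).length = q.length := by simp [List.length_zip]; omega
  rw [show ((q.length : Nat) : Int) = (((q.zip ans).length : Nat) : Int) from by rw [hlen]]
  rw [PySem.List.foldl_congr_mem (PySem.List.pyRange 0 (((q.zip ans).length : Nat) : Int) 1)
      (fun rc i => if f (PySem.List.pyGetD q i []) == PySem.List.pyGetD ans i 0 then rc + 1 else rc)
      (fun rc i => if f (PySem.List.pyGetD (q.zip ans) i ([], 0)).1
                      == (PySem.List.pyGetD (q.zip ans) i ([], 0)).2 then rc + 1 else rc)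
      0 ?_]
  · rw [PySem.List.foldl_pyRange_zero_pyGetD' (q.zip ans) ([], 0)
        (fun rc p => if f p.1 == p.2 then rc + 1 else rc) 0]
    rw [PySem.List.foldl_if_add_one (fun p => f p.1 == p.2) (q.zip ans) 0]
    omega
  · intro acc x hx
    beta_reduce
    rw [PySem.List.mem_pyRange_one] at hx
    obtain ⟨hx0, hx1⟩ := hx
    have hq : x < (q.length : Int) := by omega
    have ha : x < (ans.length : Int) := by omega
    rw [PySem.List.pyGetD_eq_getElem q [] hx0 hq,
        PySem.List.pyGetD_eq_getElem ans 0 hx0 ha,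
        PySem.List.pyGetD_eq_getElem (q.zip ans) ([], 0) hx0 hx1]
    simp [List.getElem_zip]

theorem inner_cnt_eq (case_ : List Int) (hl5 : case_.length = 5) (qi : List Int) :
    ((PySem.List.pyRange 0 5 1).foldl
        (fun c j => if qi.contains (PySem.List.pyGetD case_ j 0) then c + 1 else c) 0 : Int)
      = case_.foldl (fun acc x => acc + (if PySem.Set.contains (PySem.Set.ofList qi) x then 1 else 0)) 0 := by
  have hcond : ∀ x : Int, PySem.Set.contains (PySem.Set.ofList qi) x = qi.contains x := by
    intro x; simp [PySem.Set.contains]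
  simp only [PySem.List.foldl_if_add_one, PySem.List.foldl_add,
    PySem.List.sum_map_ite_one_zero, hcond]
  rcases case_ with _ | ⟨c0, _ | ⟨c1, _ | ⟨c2, _ | ⟨c3, _ | ⟨c4, rest⟩⟩⟩⟩⟩ <;>
    simp only [List.length_cons, List.length_nil] at hl5 <;> try omega
  have hrest : rest = [] := List.eq_nil_of_length_eq_zero (by omega)
  subst hrest
  have hr : PySem.List.pyRange 0 5 1 = [0, 1, 2, 3, 4] := by decide
  rw [hr]
  simp [pysem, List.countP_cons]

theorem solution_spec' (n : Int) (q : List (List Int)) (ans : List Int)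
    (h : Pre_solution n q ans) : solution n q ans = solution_alt n q ans := by
  simp only [solution, solution_alt]
  rw [casesA_eq, PySem.List.foldl_append_if_eq_filter, List.nil_append]
  rw [altCount_eq n _ 5 1 []]
  simp only [List.nil_append]
  have hsum := PySem.List.sum_map_ite_one_zero
    (fun c => altCheck ((List.map (fun qi => PySem.Set.ofList qi) q).zip ans) c) (comb n 5 1)
  refine Eq.trans ?_ hsum.symm
  rw [← List.countP_eq_length_filter]
  congr 1
  rcases h with hqa | hn5
  · refine List.countP_congr (fun case_ hc => ?_)
    have hl5 : case_.length = 5 := comb_length n 5 1 case_ hc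
    rw [countMatch (fun qi => (PySem.List.pyRange 0 5 1).foldl
          (fun c j => if qi.contains (PySem.List.pyGetD case_ j 0) then c + 1 else c) 0) q ans hqa]
    have hzl : (q.zip ans).length = q.length := by simp [List.length_zip]; omega
    simp only [altCheck]
    rw [List.zip_map_left, List.all_map]
    simp only [beq_iff_eq, Int.natCast_inj]
    rw [show q.length = (q.zip ans).length from hzl.symm]
    rw [List.countP_eq_length]
    rw [List.all_eq_true]
    refine ⟨fun hp p hpm => ?_, fun hp p hpm => ?_⟩ <;>
    · have := hp p hpm
      simp only [Function.comp_apply, Prod.map_fst, Prod.map_snd, id_eq, beq_iff_eq] at this ⊢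
      rw [inner_cnt_eq case_ hl5 p.1] at *
      exact this
  · have hemp : comb n 5 1 = [] := comb_nil n 4 1 (by push_cast; omega)
    rw [hemp]
    simp

-- ===== VERDICT (by name: the statement is the Claim_ definition above) =====
theorem solution_spec : Claim_equal_solution := by
  intro n q ans _ hpre
  exact solution_spec' n q ans hpre
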